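-- pv_equiv track=rewrite | github.com/aryan-410/Connect-Four-AI | connect4Ai.py | findPossibleMoves
-- ===== SOURCE A (Python) =====
-- def findPossibleMoves(board):
--     columnsTaken = []
--     validMoves = []
--     for x in reversed(range(len(board))):
--         for y in range(len(board[0])):
--             if board[x][y] == '--' and y not in columnsTaken:
--                 columnsTaken.append(y)
--                 validMoves.append((x, y))
--
--     return validMoves
-- ===== SOURCE B (Python) =====
-- def findPossibleMoves(board):
--     width = 0 if not board else len(board[0])
--     bottoms = {}
--     for y in range(width):
--         for x in reversed(range(len(board))):
--             if board[x][y] == '--':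
--                 bottoms.setdefault(x, []).append(y)
--                 break
--     return [(x, y) for x in sorted(bottoms, reverse=True) for y in bottoms[x]]
-- ===== Notes on version B (the rewrite author's own statement) =====
-- stated objective: alternative
-- what changed: Replaces A's row-major scan with a 'columnsTaken' membership list by a per-column bottom-up scan with break that finds each column's lowest empty cell once, grouping the cells by row in a dict and emitting the rows in descending sorted order.
import Mathlib
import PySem

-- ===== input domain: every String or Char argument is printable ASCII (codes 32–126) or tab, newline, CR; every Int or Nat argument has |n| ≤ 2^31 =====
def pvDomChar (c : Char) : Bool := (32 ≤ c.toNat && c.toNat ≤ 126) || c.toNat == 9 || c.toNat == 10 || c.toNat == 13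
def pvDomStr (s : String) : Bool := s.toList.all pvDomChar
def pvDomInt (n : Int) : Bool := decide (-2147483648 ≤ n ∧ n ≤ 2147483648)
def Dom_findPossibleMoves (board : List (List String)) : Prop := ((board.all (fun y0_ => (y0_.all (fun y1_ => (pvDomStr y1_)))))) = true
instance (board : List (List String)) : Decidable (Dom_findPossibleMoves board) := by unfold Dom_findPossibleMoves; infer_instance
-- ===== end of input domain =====

-- B finds each column's lowest empty cell by a bottom-up per-column scan with break, groups them by
-- row in a dict and emits rows in descending sorted order, instead of A's row-major scan with a
-- columnsTaken membership list (alternative decomposition; same results).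


-- ===== PORT A =====
-- board[x][y] (x, y nonnegative in-range under Pre_; getD is exact there)
def pvCell (board : List (List String)) (x y : Int) : String :=
  PySem.List.pyGetD (PySem.List.pyGetD board x []) y ""

def findPossibleMoves (board : List (List String)) : List (Int × Int) :=
  -- for x in reversed(range(len(board))): for y in range(len(board[0])): …
  -- state = (columnsTaken, validMoves); len(board[0]) = (board.headD []).length (outer loop runs only when board ≠ [])
  let st := ((PySem.List.pyRange 0 (board.length : Int) 1).reverse).foldl
    (fun (st : List Int × List (Int × Int)) x =>
      (PySem.List.pyRange 0 ((board.headD []).length : Int) 1).foldl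
        (fun (st : List Int × List (Int × Int)) y =>
          if pvCell board x y == "--" && !(st.1.contains y) then
            (st.1 ++ [y], st.2 ++ [(x, y)])
          else st) st)
    ([], [])
  st.2

-- ===== PORT B =====
-- for x in reversed(range(len(board))): if board[x][y] == '--': … break  →  first hit of the scan
def pvColBottom (board : List (List String)) (y : Int) : List Int → Option Int
  | [] => none
  | x :: xs => if pvCell board x y == "--" then some x else pvColBottom board y xs

def findPossibleMoves_alt (board : List (List String)) : List (Int × Int) :=
  let width : Int := if board.isEmpty then 0 else ((board.headD []).length : Int)
  let bottoms : PySem.Dict Int (List Int) :=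
    (PySem.List.pyRange 0 width 1).foldl
      (fun d y =>
        match pvColBottom board y ((PySem.List.pyRange 0 (board.length : Int) 1).reverse) with
        | some x => d.modify x [] (· ++ [y])   -- bottoms.setdefault(x, []).append(y)
        | none => d)
      PySem.Dict.empty
  (PySem.List.sorted bottoms.keys (fun k => k) true).flatMap
    (fun x => (bottoms.getD x []).map (fun y => (x, y)))

-- ===== PRECONDITION & SPEC =====
-- Pre_ excludes exactly the ragged boards on which A raises IndexError (a row shorter than row 0).
def Pre_findPossibleMoves (board : List (List String)) : Prop :=
  ∀ row ∈ board, (board.headD []).length ≤ row.length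
instance (board : List (List String)) : Decidable (Pre_findPossibleMoves board) := by
  unfold Pre_findPossibleMoves; infer_instance
def pvWitness_findPossibleMoves : List (List String) := [["--", "X"], ["--", "--"]]

def Spec_findPossibleMoves (board : List (List String)) (out : List (Int × Int)) : Prop := out = findPossibleMoves_alt board
instance (board : List (List String)) (out : List (Int × Int)) : Decidable (Spec_findPossibleMoves board out) := by unfold Spec_findPossibleMoves; infer_instance

-- ===== CLAIM (what is proved, stated in full; the proofs are below) =====
def Claim_equal_findPossibleMoves : Prop := ∀ (board : List (List String)), Dom_findPossibleMoves board → Pre_findPossibleMoves board → Spec_findPossibleMoves board (findPossibleMoves board)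

-- ===== LEMMAS AND PROOFS =====

-- Nat-level cell test
def pvC (board : List (List String)) (x y : Nat) : Bool :=
  pvCell board (x : Int) (y : Int) == "--"

-- greatest x < k with pvC board x y (the column's lowest empty cell among rows 0..k-1)
def pvTop (board : List (List String)) : Nat → Nat → Option Nat
  | 0, _ => none
  | k + 1, y => if pvC board k y then some k else pvTop board k y

-- A's remaining output after processing rows k-1..0, given columnsTaken = taken
def pvGl (board : List (List String)) (m k : Nat) (taken : List Int) : List (Int × Int) :=
  ((List.range k).reverse).flatMap (fun x =>
    ((List.range m).filter
        (fun y => pvTop board k y == some x && !(taken.contains (y : Int)))).map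
      (fun y : Nat => ((x : Int), (y : Int))))

-- one step of A's inner loop, at Nat level
def pvStepA (board : List (List String)) (x : Nat) (st : List Int × List (Int × Int)) (y : Nat) :
    List Int × List (Int × Int) :=
  if pvC board x y && !(st.1.contains (y : Int)) then
    (st.1 ++ [(y : Int)], st.2 ++ [((x : Int), (y : Int))])
  else st

theorem pvTop_lt {board : List (List String)} {k y x : Nat}
    (h : pvTop board k y = some x) : x < k ∧ pvC board x y = true := by
  induction k with
  | zero => simp [pvTop] at h
  | succ k ih =>
    simp only [pvTop] at h
    by_cases hc : pvC board k y = true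
    · simp only [hc, if_true, Option.some.injEq] at h
      exact ⟨by omega, h ▸ hc⟩
    · simp only [hc] at h
      rcases ih h with ⟨h1, h2⟩
      exact ⟨by omega, h2⟩

theorem pvTop_succ_eq_some_self {board : List (List String)} {k y : Nat} :
    (pvTop board (k + 1) y = some k) ↔ pvC board k y = true := by
  constructor
  · intro h
    by_cases hc : pvC board k y = true
    · exact hc
    · simp only [pvTop, hc] at h
      exact absurd (pvTop_lt h).1 (by omega)
  · intro hc; simp [pvTop, hc]

-- membership in taken ++ (filtered ys as Ints)
theorem pvContains_append_map (taken : List Int) (L : List Nat) (y : Nat) :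
    ((taken ++ L.map (fun z : Nat => (z : Int))).contains (y : Int))
      = (taken.contains (y : Int) || L.contains y) := by
  rw [Bool.eq_iff_iff]
  simp [List.mem_map]

-- A's inner loop over one row
theorem pvInner_eq (board : List (List String)) (x : Nat) :
    ∀ (ys : List Nat), ys.Nodup → ∀ (taken : List Int) (mv : List (Int × Int)),
    ys.foldl (pvStepA board x) (taken, mv) =
      (taken ++ (ys.filter (fun y => pvC board x y && !(taken.contains (y : Int)))).map
          (fun y : Nat => ((y : Int))),
       mv ++ (ys.filter (fun y => pvC board x y && !(taken.contains (y : Int)))).map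
          (fun y : Nat => (((x : Int), (y : Int))))) := by
  intro ys
  induction ys with
  | nil => intro _ taken mv; simp
  | cons y ys ih =>
    intro hnd taken mv
    have hy : y ∉ ys := (List.nodup_cons.mp hnd).1
    have hnd' : ys.Nodup := (List.nodup_cons.mp hnd).2
    simp only [List.foldl_cons]
    cases hp : (pvC board x y && !(taken.contains (y : Int))) with
    | true =>
      have hp' := hp
      simp only [Bool.and_eq_true, Bool.not_eq_true'] at hp'
      obtain ⟨h1, h2'⟩ := hp'
      have h2m : ((y : Int) ∉ taken) := by simpa using h2'
      have hstep : pvStepA board x (taken, mv) y =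
          (taken ++ [(y : Int)], mv ++ [((x : Int), (y : Int))]) := by
        simp [pvStepA, h1, h2m]
      rw [hstep, ih hnd']
      have hfc : ys.filter (fun y' => pvC board x y' && !((taken ++ [(y : Int)]).contains (y' : Int)))
          = ys.filter (fun y' => pvC board x y' && !(taken.contains (y' : Int))) := by
        apply List.filter_congr
        intro y' hy'
        have hne : y' ≠ y := fun h => hy (h ▸ hy')
        have hcc : ((taken ++ [(y : Int)]).contains (y' : Int)) = taken.contains (y' : Int) := by
          rw [Bool.eq_iff_iff]
          simp only [List.contains_append, List.contains_cons, List.contains_nil]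
          have : ((y' : Int) == (y : Int)) = false := by
            simp only [beq_eq_false_iff_ne, ne_eq, Int.natCast_inj]
            exact hne
          simp [this]
        rw [hcc]
      rw [hfc]
      have hcondT : pvC board x y = true ∧ ((y : Int) ∉ taken) := by
        exact ⟨h1, h2m⟩
      simp [hcondT, List.append_assoc]
    | false =>
      have hstep : pvStepA board x (taken, mv) y = (taken, mv) := by
        simp only [pvStepA]
        rw [if_neg]
        simp only [Bool.and_eq_true, not_and, Bool.not_eq_true']
        intro hcy
        rw [hcy, Bool.true_and] at hp
        cases hcc : taken.contains (y : Int) with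
        | true => simp
        | false => rw [hcc] at hp; simp at hp
      rw [hstep, ih hnd']
      have hcond : ¬(pvC board x y = true ∧ ((y : Int) ∉ taken)) := by
        rintro ⟨h1, h2⟩
        have hcf : taken.contains (y : Int) = false := by
          rw [Bool.eq_false_iff]; intro hc; exact h2 (List.contains_iff_mem.mp hc)
        rw [h1, hcf] at hp
        simp at hp
      simp [hcond]

-- the key step: one row of A's scan peels off the top block of pvGl
theorem pvGl_succ (board : List (List String)) (m k : Nat) (taken : List Int) :
    pvGl board m (k + 1) taken =
      ((List.range m).filter (fun y => pvC board k y && !(taken.contains (y : Int)))).map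
        (fun y : Nat => ((k : Int), (y : Int)))
      ++ pvGl board m k
          (taken ++ ((List.range m).filter
              (fun y => pvC board k y && !(taken.contains (y : Int)))).map
            (fun y : Nat => ((y : Int)))) := by
  unfold pvGl
  have hrev : (List.range (k + 1)).reverse = k :: (List.range k).reverse := by
    simp [List.range_succ]
  rw [hrev, List.flatMap_cons]
  congr 1
  · -- top block: x = k
    congr 1
    apply List.filter_congr
    intro y _
    by_cases hc : pvC board k y = true
    · have : pvTop board (k + 1) y = some k := pvTop_succ_eq_some_self.mpr hc
      simp [this, hc]
    · have hc' : pvC board k y = false := Bool.eq_false_iff.mpr hc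
      have : pvTop board (k + 1) y ≠ some k := fun h => hc (pvTop_succ_eq_some_self.mp h)
      simp [hc', beq_eq_false_iff_ne.mpr this]
  · -- remaining blocks: x < k
    apply List.flatMap_congr
    intro x hx
    have hxk : x < k := List.mem_range.mp (List.mem_reverse.mp hx)
    congr 1
    apply List.filter_congr
    intro y hym
    rw [pvContains_append_map]
    by_cases hc : pvC board k y = true
    · -- the column was taken in row k: both sides false
      have htop : pvTop board (k + 1) y = some k := pvTop_succ_eq_some_self.mpr hc
      have h1 : (pvTop board (k + 1) y == some x) = false := by
        rw [htop]
        simp only [beq_eq_false_iff_ne, ne_eq, Option.some.injEq]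
        omega
      rw [h1, Bool.false_and]
      cases hct : taken.contains (y : Int) with
      | true => simp
      | false =>
        have hctm : ((y : Int) ∉ taken) := by simpa using hct
        have hmem : y ∈ (List.range m).filter (fun y' => pvC board k y' && !(taken.contains (y' : Int))) :=
          List.mem_filter.mpr ⟨hym, by simp [hc, hctm]⟩
        rw [List.contains_iff_mem.mpr hmem]
        simp
    · -- row k does not touch this column
      have hc' : pvC board k y = false := Bool.eq_false_iff.mpr hc
      have htop : pvTop board (k + 1) y = pvTop board k y := by
        simp [pvTop, hc']
      have hnm : y ∉ (List.range m).filter (fun y' => pvC board k y' && !(taken.contains (y' : Int))) := by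
        intro hmem
        have := (List.mem_filter.mp hmem).2
        simp [hc'] at this
      have hLc : ((List.range m).filter
          (fun y' => pvC board k y' && !(taken.contains (y' : Int)))).contains y = false := by
        rw [Bool.eq_false_iff]
        intro hcon
        exact hnm (List.contains_iff_mem.mp hcon)
      rw [htop, hLc, Bool.or_false]

-- A's outer loop
theorem pvOuter_eq (board : List (List String)) (m : Nat) :
    ∀ (k : Nat) (taken : List Int) (mv : List (Int × Int)),
    (((List.range k).reverse).foldl
        (fun st x => (List.range m).foldl (pvStepA board x) st) (taken, mv)).2
      = mv ++ pvGl board m k taken := by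
  intro k
  induction k with
  | zero => intro taken mv; simp [pvGl]
  | succ k ih =>
    intro taken mv
    have hrev : (List.range (k + 1)).reverse = k :: (List.range k).reverse := by
      simp [List.range_succ]
    rw [hrev, List.foldl_cons,
        pvInner_eq board k (List.range m) (List.nodup_range) taken mv, ih, pvGl_succ]
    simp [List.append_assoc]

-- bridge: port A computes pvGl
theorem pvA_bridge (board : List (List String)) :
    findPossibleMoves board
      = pvGl board (board.headD []).length board.length [] := by
  unfold findPossibleMoves
  simp only [PySem.List.pyRange_zero_natCast, List.map_reverse.symm, List.foldl_map]
  exact pvOuter_eq board (board.headD []).length board.length [] []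

-- ===== B-side proofs =====

-- the per-column picks, as (x, y) Int pairs, in column order
def pvPairs (board : List (List String)) (n : Nat) (ys : List Nat) : List (Int × Int) :=
  ys.filterMap (fun y => (pvTop board n y).map (fun x : Nat => ((x : Int), (y : Int))))

def pvBot (board : List (List String)) (n m : Nat) : PySem.Dict Int (List Int) :=
  (pvPairs board n (List.range m)).foldl
    (fun d p => d.modify p.1 [] (· ++ [p.2])) PySem.Dict.empty

-- rows that received a pick, bottom row first
def pvXdesc (board : List (List String)) (n m : Nat) : List Int :=
  (((List.range n).reverse).filter
      (fun x => (List.range m).any (fun y => pvTop board n y == some x))).map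
    (fun x : Nat => (x : Int))

theorem pvColBottom_eq (board : List (List String)) (y : Nat) :
    ∀ k : Nat, pvColBottom board (y : Int) (((List.range k).reverse).map (fun x : Nat => (x : Int)))
      = (pvTop board k y).map (fun x : Nat => (x : Int)) := by
  intro k
  induction k with
  | zero => simp [pvColBottom, pvTop]
  | succ k ih =>
    have hrev : (List.range (k + 1)).reverse = k :: (List.range k).reverse := by
      simp [List.range_succ]
    rw [hrev, List.map_cons]
    by_cases hc : pvC board k y = true
    · simp only [pvColBottom, pvTop, hc, if_true]
      rw [if_pos]
      · rfl
      · exact hc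
    · have hc' : pvC board k y = false := Bool.eq_false_iff.mpr hc
      simp only [pvColBottom, pvTop, hc']
      rw [if_neg]
      · exact ih
      · simp only [pvC] at hc'
        simp [hc']

theorem pvFold_eq (board : List (List String)) (n : Nat) :
    ∀ (ys : List Nat) (d : PySem.Dict Int (List Int)),
    ys.foldl (fun d (y : Nat) =>
        match pvColBottom board (y : Int) (((List.range n).reverse).map (fun x : Nat => (x : Int))) with
        | some x => d.modify x [] (· ++ [(y : Int)])
        | none => d) d
      = (pvPairs board n ys).foldl (fun d p => d.modify p.1 [] (· ++ [p.2])) d := by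
  intro ys
  induction ys with
  | nil => intro d; simp [pvPairs]
  | cons y ys ih =>
    intro d
    rw [List.foldl_cons]
    cases htop : pvTop board n y with
    | none =>
      rw [pvColBottom_eq board y n, htop]
      simp only [Option.map_none]
      rw [ih]
      simp [pvPairs, htop]
    | some x =>
      rw [pvColBottom_eq board y n, htop]
      simp only [Option.map_some]
      rw [ih]
      simp [pvPairs, htop]

theorem pvPairs_filter (board : List (List String)) (n x : Nat) :
    ∀ ys : List Nat,
    ((pvPairs board n ys).filter (fun p => p.1 == (x : Int))).map (fun p => p.2)
      = (ys.filter (fun y => pvTop board n y == some x)).map (fun y : Nat => (y : Int)) := by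
  intro ys
  induction ys with
  | nil => simp [pvPairs]
  | cons y ys ih =>
    cases htop : pvTop board n y with
    | none =>
      simp only [pvPairs, List.filterMap_cons, htop, Option.map_none]
      rw [← pvPairs]
      simp [htop, ih]
    | some x' =>
      simp only [pvPairs, List.filterMap_cons, htop, Option.map_some]
      rw [← pvPairs]
      by_cases hx : x' = x
      · subst hx
        simp [htop, ih]
      · have h1 : (((x' : Int), (y : Int)).1 == (x : Int)) = false := by
          simp only [beq_eq_false_iff_ne, ne_eq, Int.natCast_inj]
          exact hx
        have h2 : (pvTop board n y == some x) = false := by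
          rw [htop]
          simp only [beq_eq_false_iff_ne, ne_eq, Option.some.injEq]
          exact hx
        simp [h1, h2, ih]

theorem pvBot_getD (board : List (List String)) (n m x : Nat) :
    (pvBot board n m).getD (x : Int) []
      = ((List.range m).filter (fun y => pvTop board n y == some x)).map (fun y : Nat => (y : Int)) := by
  unfold pvBot
  rw [PySem.Dict.getD_foldl_modify_append]
  rw [PySem.Dict.getD_empty]
  simpa using pvPairs_filter board n x (List.range m)

theorem pvBot_keys (board : List (List String)) (n m : Nat) :
    (pvBot board n m).keys = PySem.Set.ofList ((pvPairs board n (List.range m)).map (fun p => p.1)) := by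
  unfold pvBot
  rw [PySem.Dict.keys_foldl_modify_key (pvPairs board n (List.range m)) (fun p => p.1) []
        (fun _ p => (· ++ [p.2])) PySem.Dict.empty]
  rw [PySem.Dict.keys_empty, PySem.Set.update_nil_left]

theorem pvBot_keys_nodup (board : List (List String)) (n m : Nat) :
    (pvBot board n m).keys.Nodup := by
  rw [pvBot_keys]
  exact PySem.Set.nodup_ofList _

theorem pvMem_keys (board : List (List String)) (n m : Nat) (z : Int) :
    z ∈ (pvBot board n m).keys ↔ ∃ x y : Nat, y < m ∧ pvTop board n y = some x ∧ z = (x : Int) := by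
  rw [pvBot_keys, PySem.Set.mem_ofList]
  simp only [List.mem_map, pvPairs, List.mem_filterMap, List.mem_range, Option.map_eq_some_iff]
  constructor
  · rintro ⟨p, ⟨y, hym, x, htop, hp⟩, hz⟩
    exact ⟨x, y, hym, htop, by rw [← hz, ← hp]⟩
  · rintro ⟨x, y, hym, htop, hz⟩
    exact ⟨((x : Int), (y : Int)), ⟨y, hym, x, htop, rfl⟩, hz.symm⟩

theorem pvMem_Xdesc (board : List (List String)) (n m : Nat) (z : Int) :
    z ∈ pvXdesc board n m ↔ ∃ x y : Nat, y < m ∧ pvTop board n y = some x ∧ z = (x : Int) := by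
  unfold pvXdesc
  simp only [List.mem_map, List.mem_filter, List.mem_reverse, List.mem_range, List.any_eq_true,
    beq_iff_eq]
  constructor
  · rintro ⟨x, ⟨hxn, y, hym, htop⟩, hz⟩
    exact ⟨x, y, hym, htop, hz.symm⟩
  · rintro ⟨x, y, hym, htop, hz⟩
    exact ⟨x, ⟨(pvTop_lt htop).1, y, hym, htop⟩, hz.symm⟩

theorem pvXdesc_pairwise (board : List (List String)) (n m : Nat) :
    (pvXdesc board n m).Pairwise (fun a b => b < a) := by
  unfold pvXdesc
  rw [List.pairwise_map]
  apply List.Pairwise.filter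
  rw [List.pairwise_reverse]
  apply List.Pairwise.imp _ (List.pairwise_lt_range (n := n))
  intro a b h
  exact_mod_cast h

theorem pvSorted_keys (board : List (List String)) (n m : Nat) :
    PySem.List.sorted (pvBot board n m).keys (fun k => k) true = pvXdesc board n m := by
  apply PySem.List.sorted_rev_eq_of_perm_of_pairwise_gt
  · rw [List.perm_ext_iff_of_nodup]
    · intro z
      rw [pvMem_Xdesc, pvMem_keys]
    · apply List.Nodup.map
      · exact fun a b h => Nat.cast_injective h
      · exact List.Nodup.filter _ (List.nodup_reverse.mpr (List.nodup_range (n := n)))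
    · exact pvBot_keys_nodup board n m
  · exact pvXdesc_pairwise board n m

theorem pvFlatMap_filter {α : Type} (p : Nat → Bool) (f : Nat → List α) :
    ∀ l : List Nat, (∀ x ∈ l, p x = false → f x = []) →
    (l.filter p).flatMap f = l.flatMap f := by
  intro l
  induction l with
  | nil => intro _; rfl
  | cons x l ih =>
    intro h
    cases hp : p x with
    | true =>
      rw [List.filter_cons_of_pos hp, List.flatMap_cons, List.flatMap_cons,
        ih (fun a ha => h a (List.mem_cons_of_mem x ha))]
    | false =>
      rw [List.filter_cons_of_neg (by simp [hp]), List.flatMap_cons,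
        h x List.mem_cons_self hp, List.nil_append,
        ih (fun a ha => h a (List.mem_cons_of_mem x ha))]

-- bridge: port B computes pvGl too
theorem pvB_bridge (board : List (List String)) :
    findPossibleMoves_alt board
      = pvGl board (board.headD []).length board.length [] := by
  rcases board with _ | ⟨r, rest⟩
  · rfl
  · set board := r :: rest with hb
    set n := board.length with hn
    set m := (board.headD []).length with hm
    unfold findPossibleMoves_alt
    have hw : (if board.isEmpty then (0 : Int) else ((board.headD []).length : Int)) = (m : Int) := by
      rw [hb]; rfl
    rw [hw]
    simp only [PySem.List.pyRange_zero_natCast, List.map_reverse.symm, List.foldl_map]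
    rw [pvFold_eq board n (List.range m) PySem.Dict.empty]
    rw [← pvBot, pvSorted_keys]
    unfold pvXdesc
    rw [List.flatMap_map]
    rw [pvFlatMap_filter _ _ _ ?side]
    case side =>
      intro x hx hfalse
      rw [pvBot_getD board n m x]
      have : (List.range m).filter (fun y => pvTop board n y == some x) = [] := by
        rw [List.filter_eq_nil_iff]
        intro y hym
        have := List.any_eq_false.mp hfalse y hym
        simpa using this
      rw [this]
      rfl
    unfold pvGl
    apply List.flatMap_congr
    intro x hx
    rw [pvBot_getD board n m x, List.map_map]
    simp

theorem findPossibleMoves_spec : Claim_equal_findPossibleMoves := by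
  unfold Claim_equal_findPossibleMoves
  intro board _ _
  unfold Spec_findPossibleMoves
  rw [pvA_bridge, pvB_bridge]
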